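-- pv_equiv track=rewrite | github.com/hann013/advent-of-code-2020 | day-6/day-6.py | getEveryoneYesAnswers
-- ===== SOURCE A (Python) =====
-- def getEveryoneYesAnswers(group):
--     answers = group.split("\n")
--     # convert answers to sets of letters so we can get the intersection of sets
--     answers = list(map(set, answers))
--     everyone = answers[0]
--     for a in answers[1:]:
--         # ignore empty sets
--         if not len(a) == 0:
--             everyone = everyone.intersection(a)
--     return everyone
-- ===== SOURCE B (Python) =====
-- def getEveryoneYesAnswers(group):
--     first, *rest = group.split("\n")
--     considered = [first] + [l for l in rest if l]
--     counts = {}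
--     for line in considered:
--         for c in dict.fromkeys(line):
--             counts[c] = counts.get(c, 0) + 1
--     total = len(considered)
--     return {c for c, n in counts.items() if n == total}
-- ===== Notes on version B (the rewrite author's own statement) =====
-- stated objective: alternative
-- what changed: A folds pairwise set-intersections over the per-line letter sets; B builds one letter-frequency table over the considered lines (first line always, later lines only if non-empty) and returns the letters whose line-count equals the number of considered lines.
import Mathlib
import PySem

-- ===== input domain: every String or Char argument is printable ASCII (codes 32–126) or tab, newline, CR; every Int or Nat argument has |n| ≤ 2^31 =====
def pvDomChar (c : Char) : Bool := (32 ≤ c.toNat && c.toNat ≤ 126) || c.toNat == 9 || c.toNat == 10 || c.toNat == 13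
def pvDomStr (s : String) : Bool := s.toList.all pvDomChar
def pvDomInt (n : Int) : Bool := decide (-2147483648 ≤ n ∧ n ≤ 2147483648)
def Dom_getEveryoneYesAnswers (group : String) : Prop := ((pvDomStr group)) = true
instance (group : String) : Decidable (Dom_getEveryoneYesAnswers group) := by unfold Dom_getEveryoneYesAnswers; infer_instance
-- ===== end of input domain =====

-- B replaces A's repeated pairwise set-intersections with one letter-frequency table over the
-- considered lines followed by a count==total threshold filter (objective: alternative).

-- chars of a line as Python 1-character strings (the elements of the Python sets)
def pvChars (s : String) : List String := s.toList.map (fun c => String.ofList [c])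

-- ===== PORT A =====
def getEveryoneYesAnswers (group : String) : List String :=
  -- answers = group.split("\n"); answers = list(map(set, answers)); sep ≠ "" so split? is always some
  let answers := ((PySem.Str.split? group "\n").getD []).map (fun a => PySem.Set.ofList (pvChars a))
  match answers with
  | [] => []   -- unreachable: str.split with a non-empty separator never returns an empty list
  | everyone0 :: restSets =>
    restSets.foldl (fun everyone a =>
      if PySem.Set.len a == 0 then everyone else PySem.Set.inter everyone a) everyone0

-- ===== PORT B =====
def getEveryoneYesAnswers_alt (group : String) : List String :=
  match (PySem.Str.split? group "\n").getD [] with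
  | [] => []   -- unreachable: str.split with a non-empty separator never returns an empty list
  | first :: rest =>
    let considered := [first] ++ rest.filter (fun l => decide (l ≠ ""))
    let counts := considered.foldl (fun d line =>
      (PySem.List.dedup (pvChars line)).foldl (fun d c => d.insert c (d.getD c 0 + 1)) d)
      PySem.Dict.empty
    let total : Int := considered.length
    PySem.Set.ofList ((counts.items.filter (fun p => p.2 == total)).map (fun p => p.1))


-- ===== PRECONDITION & SPEC =====
def Spec_getEveryoneYesAnswers (group : String) (out : List String) : Prop := out = getEveryoneYesAnswers_alt group
instance (group : String) (out : List String) : Decidable (Spec_getEveryoneYesAnswers group out) := by unfold Spec_getEveryoneYesAnswers; infer_instance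

-- ===== CLAIM (what is proved, stated in full; the proofs are below) =====
def Claim_equal_getEveryoneYesAnswers : Prop := ∀ (group : String), Dom_getEveryoneYesAnswers group → Spec_getEveryoneYesAnswers group (getEveryoneYesAnswers group)

-- ===== LEMMAS AND PROOFS =====

-- A-side fold characterization
theorem foldA_eq_filter (rest : List String) (S : PySem.Set String) :
    rest.foldl (fun everyone l =>
      let a := PySem.Set.ofList (pvChars l)
      if PySem.Set.len a == 0 then everyone else PySem.Set.inter everyone a) S
    = S.filter (fun c => rest.all (fun l => (l == "") || (PySem.Set.ofList (pvChars l)).contains c)) := by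
  induction rest generalizing S with
  | nil => simp
  | cons l rest ih =>
    simp only [List.foldl_cons, List.all_cons]
    by_cases h : l = ""
    · subst h
      rw [if_pos (by decide)]
      rw [ih]
      simp [pvChars]
    · have hne : pvChars l ≠ [] := by simp [pvChars, h]
      rw [if_neg ?_]
      · rw [show PySem.Set.inter S (PySem.Set.ofList (pvChars l)) = S.filter ((PySem.Set.ofList (pvChars l)).contains) from rfl]
        rw [ih, List.filter_filter]
        rw [show (l == "") = false from by simp [h]]
        simp [Bool.and_comm]
      · rcases List.exists_mem_of_ne_nil (pvChars l) hne with ⟨x, hx⟩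
        have hx' : x ∈ PySem.Set.ofList (pvChars l) := (PySem.Set.mem_ofList _ _).mpr hx
        have : PySem.Set.ofList (pvChars l) ≠ [] := List.ne_nil_of_mem hx'
        simp [PySem.Set.len, this]

-- count of c in a dedup'd list is 0/1 by membership
theorem count_dedup (xs : List String) (c : String) :
    (PySem.Set.ofList xs).count c = if c ∈ xs then 1 else 0 := by
  have hn := PySem.Set.nodup_ofList xs
  by_cases h : c ∈ xs
  · have hm : c ∈ PySem.Set.ofList xs := (PySem.Set.mem_ofList xs c).mpr h
    have h1 : (PySem.Set.ofList xs).count c ≤ 1 := by rw [List.nodup_iff_count_le_one] at hn; exact hn c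
    have h2 : 0 < (PySem.Set.ofList xs).count c := List.count_pos_iff.mpr hm
    simp only [if_pos h]; omega
  · have hm : c ∉ PySem.Set.ofList xs := fun hc => h ((PySem.Set.mem_ofList xs c).mp hc)
    simp [h, List.count_eq_zero.mpr hm]

-- count of c in the flattened dedup'd considered lines
theorem count_flat (ls : List String) (c : String) :
    (ls.flatMap (fun l => PySem.Set.ofList (pvChars l))).count c
      = ls.countP (fun l => decide (c ∈ pvChars l)) := by
  induction ls with
  | nil => simp
  | cons l ls ih =>
    simp only [List.flatMap_cons, List.count_append, List.countP_cons, ih, count_dedup]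
    by_cases h : c ∈ pvChars l <;> simp [h] <;> try omega

-- filtering a Set.update by a predicate false on all genuinely-new elements
theorem filter_update (p : String → Bool) (ys : List String) (s : PySem.Set String)
    (h : ∀ y ∈ ys, p y = true → y ∈ s) :
    (PySem.Set.update s ys).filter p = s.filter p := by
  induction ys generalizing s with
  | nil => rfl
  | cons y ys ih =>
    show (PySem.Set.update (PySem.Set.add s y) ys).filter p = _
    rw [ih (PySem.Set.add s y) ?_]
    · by_cases hy : s.contains y = true
      · simp only [PySem.Set.add, if_pos hy]
      · have hpy : p y = false := by
          by_contra hc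
          have := h y (by simp) (by revert hc; cases p y <;> simp)
          exact hy ((PySem.Set.contains_iff s y).mpr this)
        simp only [PySem.Set.add, if_neg hy, List.filter_append]
        simp [hpy]
    · intro z hz hp
      have := h z (by simp [hz]) hp
      simp only [PySem.Set.add]
      split
      · exact this
      · simp [this]
theorem ofList_append (xs ys : List String) :
    PySem.Set.ofList (xs ++ ys) = PySem.Set.update (PySem.Set.ofList xs) ys := by
  rw [PySem.Set.ofList_eq_foldl, List.foldl_append, ← PySem.Set.ofList_eq_foldl]
  rfl

theorem pv_main (group : String) :
    getEveryoneYesAnswers group = getEveryoneYesAnswers_alt group := by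
  unfold getEveryoneYesAnswers getEveryoneYesAnswers_alt
  rcases hsplit : (PySem.Str.split? group "\n").getD [] with _ | ⟨first, rest⟩
  · simp
  · simp only [List.map_cons]
    set rfil := rest.filter (fun l => decide (l ≠ "")) with hrfil
    set rflat := rfil.flatMap (fun l => PySem.Set.ofList (pvChars l)) with hrflat
    -- A side
    rw [List.foldl_map, foldA_eq_filter]
    -- B side
    simp only [List.singleton_append, PySem.List.dedup_eq_ofList, ← List.foldl_flatMap,
      PySem.Dict.foldl_insert_getD_add_one_eq_counter, List.length_cons,
      PySem.Dict.items_counter, List.filter_map, List.map_map]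
    have hflat : (first :: rfil).flatMap (fun l => PySem.Set.ofList (pvChars l))
        = PySem.Set.ofList (pvChars first) ++ rflat := by
      simp [hrflat]
    rw [hflat]
    set flat := PySem.Set.ofList (pvChars first) ++ rflat with hflatdef
    set total : Int := ((rfil.length + 1 : Nat) : Int) with htotal
    set q : String → Bool := fun k => ((flat.count k : Int) == total) with hq
    have hqc : ((fun p => p.2 == total) ∘ fun k => (k, (flat.count k : Int))) = q := rfl
    rw [hqc]
    have hmapfst : ((PySem.Set.ofList flat).filter q).map ((fun p => p.1) ∘ (fun k => (k, (flat.count k : Int)))) = (PySem.Set.ofList flat).filter q := by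
      simp [Function.comp_def]
    rw [hmapfst]
    have hnodup : ((PySem.Set.ofList flat).filter q).Nodup :=
      List.Nodup.filter _ (PySem.Set.nodup_ofList flat)
    rw [PySem.Set.ofList_eq_self_of_nodup _ hnodup]
    -- count in flat for c ∈ pvChars first is 1 + countP
    have hcount : ∀ c, flat.count c
        = (if c ∈ pvChars first then 1 else 0) + rfil.countP (fun l => decide (c ∈ pvChars l)) := by
      intro c
      rw [hflatdef, List.count_append, count_dedup, hrflat, count_flat]
    -- q is false on genuinely new elements of rflat
    rw [hflatdef, ofList_append, filter_update q rflat _ ?_, PySem.Set.ofList_ofList]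
    · -- final: the two filters agree on elements of ofList (pvChars first)
      apply List.filter_congr
      intro c hc
      have hcf : c ∈ pvChars first := (PySem.Set.mem_ofList _ _).mp hc
      have hcnt := hcount c
      rw [if_pos hcf] at hcnt
      have hle : rfil.countP (fun l => decide (c ∈ pvChars l)) ≤ rfil.length :=
        List.countP_le_length
      simp only [hq, hcnt, htotal]
      rw [Bool.eq_iff_iff]
      simp only [List.all_eq_true, Bool.or_eq_true, beq_iff_eq, Nat.cast_inj,
        PySem.Set.contains_iff, PySem.Set.mem_ofList]
      constructor
      · intro hall
        have : rfil.countP (fun l => decide (c ∈ pvChars l)) = rfil.length := by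
          rw [List.countP_eq_length]
          intro l hl
          rw [hrfil, List.mem_filter] at hl
          rcases hall l hl.1 with h1 | h2
          · exact absurd h1 (by simpa using hl.2)
          · simpa using h2
        omega
      · intro heq l hl
        by_cases hl0 : l = ""
        · exact Or.inl hl0
        · refine Or.inr ?_
          have hmem : l ∈ rfil := by
            rw [hrfil, List.mem_filter]; exact ⟨hl, by simpa using hl0⟩
          have hlen : rfil.countP (fun l => decide (c ∈ pvChars l)) = rfil.length := by omega
          have := List.countP_eq_length.mp hlen l hmem
          simpa using this
    · intro y hy hqy
      rw [PySem.Set.mem_ofList, PySem.Set.mem_ofList]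
      by_contra hnc
      have hcnt := hcount y
      rw [if_neg hnc] at hcnt
      have hle : rfil.countP (fun l => decide (y ∈ pvChars l)) ≤ rfil.length :=
        List.countP_le_length
      rw [hq] at hqy
      simp only [beq_iff_eq] at hqy
      rw [hcnt, htotal] at hqy
      simp at hqy
      omega

-- ===== VERDICT (by name: the statement is the Claim_ definition above) =====
theorem getEveryoneYesAnswers_spec : Claim_equal_getEveryoneYesAnswers := by
  intro g _
  exact pv_main g
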